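-- pv_equiv track=rewrite | github.com/manojkumar1053/random_code_practice | AE/cycle_in_graph2.py | dfs_find_cycle
-- ===== SOURCE A (Python) =====
-- def dfs_find_cycle(edges, target):
--     stack = [target]
--     seen = set()
--     while stack:
--         curr = stack.pop()
--         if target in edges[curr]:
--             return True
--         seen.add(curr)
--
--         for child in edges[curr]:
--             if child not in seen:
--                 stack.append(child)
--
--     return False
-- ===== SOURCE B (Python) =====
-- def dfs_find_cycle(edges, target):
--     # Level-wise BFS: expand the reachable set one level at a time; before expanding a
--     # level, check whether any of its nodes has an edge back to target.
--     reach = {target}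
--     frontier = {target}
--     while frontier:
--         if any(target in edges[u] for u in frontier):
--             return True
--         nxt = {c for u in frontier for c in edges[u] if c not in reach}
--         reach |= nxt
--         frontier = nxt
--     return False
-- ===== Notes on version B (the rewrite author's own statement) =====
-- stated objective: alternative
-- what changed: Replaces the early-exit LIFO-stack DFS by a level-wise BFS: the reachable set is grown one whole level at a time and each level is scanned for an edge back to target before being expanded.
-- outside the precondition, e.g. on dfs_find_cycle([[0, -3], [-4, -4, 2], [8, -2]], 2): A returns True, B raises IndexError; on dfs_find_cycle([[1, 2], [9], [0]], 0): A returns True, B returns True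
import Mathlib
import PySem

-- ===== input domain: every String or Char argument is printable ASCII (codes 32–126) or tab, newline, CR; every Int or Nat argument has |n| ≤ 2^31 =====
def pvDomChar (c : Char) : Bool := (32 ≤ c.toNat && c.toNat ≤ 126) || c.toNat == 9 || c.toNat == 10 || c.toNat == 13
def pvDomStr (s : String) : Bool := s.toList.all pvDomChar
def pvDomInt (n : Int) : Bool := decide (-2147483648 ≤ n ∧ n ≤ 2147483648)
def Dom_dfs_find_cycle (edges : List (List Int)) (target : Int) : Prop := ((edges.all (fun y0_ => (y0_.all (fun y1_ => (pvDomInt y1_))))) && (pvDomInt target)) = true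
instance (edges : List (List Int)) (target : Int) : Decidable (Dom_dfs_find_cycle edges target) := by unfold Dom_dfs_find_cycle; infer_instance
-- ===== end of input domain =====

-- B replaces A's early-exit LIFO-stack DFS by a fixpoint saturation of the reachable set
-- followed by one scan for an edge back to target (alternative decomposition, same cost).

-- ===== PORT A =====
-- edges[u] (Python indexing, negative from the end); total via getD — inputs where the
-- Python raises IndexError are excluded by Pre_dfs_find_cycle.
def pvRow (edges : List (List Int)) (u : Int) : List Int :=
  (PySem.List.pyGet? edges u).getD []

-- largest row length, used only to size the (proved sufficient) fuel of the while-loop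
def pvMaxDeg (edges : List (List Int)) : Nat :=
  edges.foldr (fun r m => max r.length m) 0

def pvFuelA (edges : List (List Int)) : Nat :=
  2 + (2 * pvMaxDeg edges + 3) * (1 + edges.flatten.length)

-- the while-loop of A; stack head = top (Python pops/pushes at the list end, so the
-- children pushed in order are popped in reverse: (filter …).reverse ++ rest).
-- Fuel-indexed (none = fuel exhausted); pvFuelA is proved sufficient below.
def pvDfsLoop (edges : List (List Int)) (target : Int) :
    Nat → List Int → PySem.Set Int → Option Bool
  | 0, _, _ => none
  | Nat.succ f, stack, seen =>
    match stack with
    | [] => some false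
    | curr :: rest =>
      if target ∈ pvRow edges curr then some true
      else
        let seen' := PySem.Set.add seen curr
        pvDfsLoop edges target f
          (((pvRow edges curr).filter (fun c => !(PySem.Set.contains seen' c))).reverse ++ rest)
          seen'

def dfs_find_cycle (edges : List (List Int)) (target : Int) : Bool :=
  (pvDfsLoop edges target (pvFuelA edges) [target] PySem.Set.empty).getD false

-- ===== PORT B =====
-- the while-loop of B: one level of BFS per step; the level is first scanned for an
-- edge back to target, then expanded.  Fuel-indexed (none = fuel exhausted);
-- 2 * |flatten| + 4 iterations are proved sufficient below.
def pvBfsLoop (edges : List (List Int)) (target : Int) :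
    Nat → PySem.Set Int → PySem.Set Int → Option Bool
  | 0, _, _ => none
  | Nat.succ f, reach, frontier =>
    if frontier = [] then some false
    else if frontier.any (fun u => decide (target ∈ pvRow edges u)) then some true
    else
      let nxt : PySem.Set Int := PySem.Set.ofList
        ((frontier.flatMap (fun u => pvRow edges u)).filter
          (fun c => !(PySem.Set.contains reach c)))
      pvBfsLoop edges target f (PySem.Set.update reach nxt) nxt

def dfs_find_cycle_alt (edges : List (List Int)) (target : Int) : Bool :=
  (pvBfsLoop edges target (2 * edges.flatten.length + 4)
    (PySem.Set.ofList [target]) (PySem.Set.ofList [target])).getD false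

-- ===== PRECONDITION & SPEC =====
-- one expansion step of the set of nodes the programs may index: a node whose row
-- contains target is an answer and is never expanded further
def pvStepF (edges : List (List Int)) (target : Int) (s : Finset Int) : Finset Int :=
  s ∪ s.biUnion (fun u => if target ∈ pvRow edges u then ∅ else (pvRow edges u).toFinset)

def pvCloseSet (edges : List (List Int)) (target : Int) : Finset Int :=
  (pvStepF edges target)^[edges.flatten.length + 1] {target}

-- Pre_ requires every node reachable from target through rows not containing target
-- (the saturation above, which always contains target) to be a valid Python index into
-- edges: the Python A raises IndexError on every out-of-range index it visits.  Because
-- A's depth-first order may hit an answer before visiting all such nodes, this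
-- over-excludes some inputs on which A still returns (see the cited examples).
def Pre_dfs_find_cycle (edges : List (List Int)) (target : Int) : Prop :=
  ∀ u ∈ pvCloseSet edges target, PySem.Raise.InRange edges.length u
instance (edges : List (List Int)) (target : Int) : Decidable (Pre_dfs_find_cycle edges target) := by
  unfold Pre_dfs_find_cycle; infer_instance

def pvWitness_dfs_find_cycle : List (List Int) × Int := ([[1], [0]], 0)

def Spec_dfs_find_cycle (edges : List (List Int)) (target : Int) (out : Bool) : Prop := out = dfs_find_cycle_alt edges target
instance (edges : List (List Int)) (target : Int) (out : Bool) : Decidable (Spec_dfs_find_cycle edges target out) := by unfold Spec_dfs_find_cycle; infer_instance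

-- ===== CLAIM (what is proved, stated in full; the proofs are below) =====
def Claim_equal_dfs_find_cycle : Prop := ∀ (edges : List (List Int)) (target : Int), Dom_dfs_find_cycle edges target → Pre_dfs_find_cycle edges target → Spec_dfs_find_cycle edges target (dfs_find_cycle edges target)

-- ===== LEMMAS AND PROOFS =====

-- the common semantics: reachability from target along rows
inductive pvReach (edges : List (List Int)) (target : Int) : Int → Prop
  | base : pvReach edges target target
  | step {u c : Int} : pvReach edges target u → c ∈ pvRow edges u → pvReach edges target c

def pvPred (edges : List (List Int)) (target : Int) : Prop :=
  ∃ c, pvReach edges target c ∧ target ∈ pvRow edges c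

-- candidate nodes: target plus every listed entry
def pvCand (edges : List (List Int)) (target : Int) : Finset Int :=
  insert target edges.flatten.toFinset

lemma pvRow_sub_flatten {edges : List (List Int)} {u c : Int}
    (hc : c ∈ pvRow edges u) : c ∈ edges.flatten := by
  unfold pvRow at hc
  cases h : PySem.List.pyGet? edges u with
  | none => simp [h] at hc
  | some r =>
    simp only [h, Option.getD_some] at hc
    exact List.mem_flatten.2 ⟨r, PySem.List.mem_of_pyGet?_eq_some edges h, hc⟩

lemma pvRow_len_le (edges : List (List Int)) (u : Int) :
    (pvRow edges u).length ≤ pvMaxDeg edges := by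
  unfold pvRow
  cases h : PySem.List.pyGet? edges u with
  | none => simp
  | some r =>
    simp only [Option.getD_some]
    have hr : r ∈ edges := PySem.List.mem_of_pyGet?_eq_some edges h
    clear h
    induction edges with
    | nil => simp at hr
    | cons e es ih =>
      unfold pvMaxDeg
      rcases List.mem_cons.1 hr with h | h
      · subst h; simp
      · have := ih h
        simp only [List.foldr_cons]
        exact le_trans (by unfold pvMaxDeg at this; exact this) (le_max_right _ _)

lemma pvCand_card_le (edges : List (List Int)) (target : Int) :
    (pvCand edges target).card ≤ 1 + edges.flatten.length := by
  unfold pvCand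
  calc (insert target edges.flatten.toFinset).card
      ≤ edges.flatten.toFinset.card + 1 := Finset.card_insert_le _ _
    _ ≤ edges.flatten.length + 1 := by
        have := edges.flatten.toFinset_card_le
        omega
    _ = 1 + edges.flatten.length := by omega

-- ===== A-side =====

lemma pvNotMem_of_filter {s : PySem.Set Int} {c : Int}
    (h : (!(PySem.Set.contains s c)) = true) : c ∉ s := by
  intro hm
  have hc : PySem.Set.contains s c = true := (PySem.Set.contains_iff s c).2 hm
  rw [hc] at h
  simp at h

lemma pvA_sound (edges : List (List Int)) (target : Int) :
    ∀ (f : Nat) (stack : List Int) (seen : PySem.Set Int),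
      (∀ x ∈ stack, pvReach edges target x) →
      pvDfsLoop edges target f stack seen = some true →
      pvPred edges target := by
  intro f
  induction f with
  | zero => intro stack seen _ h; simp [pvDfsLoop] at h
  | succ f ih =>
    intro stack seen hst h
    match stack with
    | [] => simp [pvDfsLoop] at h
    | curr :: rest =>
      by_cases htar : target ∈ pvRow edges curr
      · exact ⟨curr, hst curr (by simp), htar⟩
      · simp only [pvDfsLoop, if_neg htar] at h
        refine ih _ _ ?_ h
        intro x hx
        rcases List.mem_append.1 hx with hx | hx
        · exact pvReach.step (hst curr (by simp))
            (List.mem_filter.1 (List.mem_reverse.1 hx)).1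
        · exact hst x (List.mem_cons_of_mem _ hx)

lemma pvA_false (edges : List (List Int)) (target : Int) :
    ∀ (f : Nat) (stack : List Int) (seen : PySem.Set Int),
      (∀ u ∈ seen, target ∉ pvRow edges u) →
      (∀ u ∈ seen, ∀ c ∈ pvRow edges u, c ∈ seen ∨ c ∈ stack) →
      (target ∈ seen ∨ target ∈ stack) →
      pvDfsLoop edges target f stack seen = some false →
      ¬ pvPred edges target := by
  intro f
  induction f with
  | zero => intro stack seen _ _ _ h; simp [pvDfsLoop] at h
  | succ f ih =>
    intro stack seen h1 h2 h3 h
    match stack with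
    | [] =>
      -- stack empty: seen is closed under children and contains target
      rintro ⟨c, hc, htc⟩
      have hcseen : ∀ x, pvReach edges target x → x ∈ seen := by
        intro x hx
        induction hx with
        | base => exact h3.resolve_right (by simp)
        | step hu hcu ihx => exact (h2 _ ihx _ hcu).resolve_right (by simp)
      exact h1 c (hcseen c hc) htc
    | curr :: rest =>
      by_cases htar : target ∈ pvRow edges curr
      · simp [pvDfsLoop, htar] at h
      · simp only [pvDfsLoop, if_neg htar] at h
        refine ih _ _ ?_ ?_ ?_ h
        · intro u hu
          rcases (PySem.Set.mem_add _ _ _).1 hu with hu | hu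
          · exact h1 u hu
          · subst hu; exact htar
        · intro u hu c hc
          rcases (PySem.Set.mem_add _ _ _).1 hu with hu | hu
          · rcases h2 u hu c hc with hcs | hcs
            · exact Or.inl ((PySem.Set.mem_add _ _ _).2 (Or.inl hcs))
            · rcases List.mem_cons.1 hcs with hcc | hcc
              · exact Or.inl ((PySem.Set.mem_add _ _ _).2 (Or.inr hcc))
              · exact Or.inr (List.mem_append.2 (Or.inr hcc))
          · subst hu
            by_cases hcs : c ∈ PySem.Set.add seen u
            · exact Or.inl hcs
            · refine Or.inr (List.mem_append.2 (Or.inl ?_))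
              rw [List.mem_reverse]
              refine List.mem_filter.2 ⟨hc, ?_⟩
              simp [hcs]
        · rcases h3 with h3 | h3
          · exact Or.inl ((PySem.Set.mem_add _ _ _).2 (Or.inl h3))
          · rcases List.mem_cons.1 h3 with h3 | h3
            · exact Or.inl ((PySem.Set.mem_add _ _ _).2 (Or.inr h3))
            · exact Or.inr (List.mem_append.2 (Or.inr h3))

lemma pvCard_drop {cand : Finset Int} {s : List Int} {c : Int}
    (hc : c ∈ cand) (hcs : c ∉ s) :
    (cand \ (s ++ [c]).toFinset).card + 1 = (cand \ s.toFinset).card := by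
  have h1 : (s ++ [c]).toFinset = insert c s.toFinset := by
    ext x; simp
  have hmem : c ∈ cand \ s.toFinset := by
    rw [Finset.mem_sdiff]; exact ⟨hc, by simpa using hcs⟩
  have hpos : 1 ≤ (cand \ s.toFinset).card := Finset.card_pos.2 ⟨c, hmem⟩
  rw [h1, Finset.sdiff_insert, Finset.card_erase_of_mem hmem]
  omega

lemma pvStackSub {edges : List (List Int)} {target curr : Int} {rest : List Int}
    (hsub : ∀ x ∈ curr :: rest, x ∈ pvCand edges target)
    (pushed : List Int) (hp : ∀ x ∈ pushed, x ∈ pvRow edges curr) :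
    ∀ x ∈ pushed.reverse ++ rest, x ∈ pvCand edges target := by
  intro x hx
  rcases List.mem_append.1 hx with hx | hx
  · exact Finset.mem_insert_of_mem
      (List.mem_toFinset.2 (pvRow_sub_flatten (hp x (List.mem_reverse.1 hx))))
  · exact hsub x (List.mem_cons_of_mem _ hx)

lemma pvA_total (edges : List (List Int)) (target : Int) :
    ∀ (f : Nat) (stack : List Int) (seen : PySem.Set Int),
      stack.length + (2 * pvMaxDeg edges + 3) * ((pvCand edges target) \ seen.toFinset).card < f →
      (∀ x ∈ stack, x ∈ pvCand edges target) →
      pvDfsLoop edges target f stack seen ≠ none := by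
  intro f
  induction f using Nat.strong_induction_on with
  | _ f ih =>
  intro stack seen hmu hsub
  match f, stack with
  | 0, stack => omega
  | Nat.succ f, [] => simp [pvDfsLoop]
  | Nat.succ f, curr :: rest =>
    by_cases htar : target ∈ pvRow edges curr
    · simp [pvDfsLoop, htar]
    · simp only [pvDfsLoop, if_neg htar]
      have hrowD := pvRow_len_le edges curr
      by_cases hcur : curr ∈ seen
      · -- curr already seen: seen unchanged
        have hadd : PySem.Set.add seen curr = seen := PySem.Set.add_of_mem hcur
        rw [hadd]
        set pushed := (pvRow edges curr).filter (fun c => !(PySem.Set.contains seen c)) with hp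
        have hplen : pushed.length ≤ pvMaxDeg edges :=
          le_trans (List.length_filter_le _ _) hrowD
        by_cases hpe : pushed = []
        · rw [hpe]
          simp only [List.reverse_nil, List.nil_append]
          refine ih f (by omega) rest seen ?_ ?_
          · simp only [List.length_cons] at hmu; omega
          · exact fun x hx => hsub x (List.mem_cons_of_mem _ hx)
        · -- pushed nonempty: the new top of stack is un-seen; unfold one more step
          obtain ⟨c, qs, hrev⟩ : ∃ c qs, pushed.reverse = c :: qs := by
            cases hq : pushed.reverse with
            | nil => exact absurd (by simpa using hq) hpe
            | cons a l => exact ⟨a, l, rfl⟩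
          have hcp : c ∈ pushed := by rw [← List.mem_reverse, hrev]; simp
          have hcnot : c ∉ seen := pvNotMem_of_filter (List.mem_filter.1 hcp).2
          have hcrow : c ∈ pvRow edges curr := (List.mem_filter.1 hcp).1
          have hccand : c ∈ pvCand edges target :=
            Finset.mem_insert_of_mem (List.mem_toFinset.2 (pvRow_sub_flatten hcrow))
          have hqlen : qs.length + 1 = pushed.length := by
            have := congrArg List.length hrev
            simpa [List.length_reverse] using this.symm
          rw [hrev]
          cases f with
          | zero => simp only [List.length_cons] at hmu; omega
          | succ g =>
            simp only [pvDfsLoop, List.cons_append]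
            by_cases htar2 : target ∈ pvRow edges c
            · simp [htar2]
            · simp only [if_neg htar2]
              have hadd2 : PySem.Set.add seen c = seen ++ [c] := PySem.Set.add_of_not_mem hcnot
              have hcard := pvCard_drop (s := seen) hccand hcnot
              refine ih g (by omega) _ _ ?_ ?_
              · rw [hadd2]
                have hlen2 : ((pvRow edges c).filter
                    (fun x => !(PySem.Set.contains ((seen : PySem.Set Int) ++ [c]) x))).length
                    ≤ pvMaxDeg edges :=
                  le_trans (List.length_filter_le _ _) (pvRow_len_le edges c)
                have hmul2 : (2 * pvMaxDeg edges + 3) *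
                    ((pvCand edges target) \ ((seen : PySem.Set Int) ++ [c]).toFinset).card
                    + (2 * pvMaxDeg edges + 3)
                    = (2 * pvMaxDeg edges + 3) *
                      ((pvCand edges target) \ seen.toFinset).card := by
                  rw [← hcard]; ring
                simp only [List.length_append, List.length_reverse, List.length_cons] at *
                omega
              · refine pvStackSub ?_ _ (fun x hx => (List.mem_filter.1 hx).1)
                intro x hx
                rcases List.mem_cons.1 hx with hx | hx
                · subst hx; exact hccand
                · rcases List.mem_append.1 hx with hx | hx
                  · have : x ∈ pushed := by rw [← List.mem_reverse, hrev]; simp [hx]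
                    exact Finset.mem_insert_of_mem (List.mem_toFinset.2
                      (pvRow_sub_flatten ((List.mem_filter.1 this).1)))
                  · exact hsub x (List.mem_cons_of_mem _ hx)
      · -- curr newly seen: the unseen count drops
        have hccand : curr ∈ pvCand edges target := hsub curr (by simp)
        have hadd : PySem.Set.add seen curr = seen ++ [curr] := PySem.Set.add_of_not_mem hcur
        have hcard := pvCard_drop (s := seen) hccand hcur
        refine ih f (by omega) _ _ ?_ ?_
        · rw [hadd]
          have hlen2 : ((pvRow edges curr).filter
              (fun x => !(PySem.Set.contains ((seen : PySem.Set Int) ++ [curr]) x))).length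
              ≤ pvMaxDeg edges :=
            le_trans (List.length_filter_le _ _) hrowD
          have hmul2 : (2 * pvMaxDeg edges + 3) *
              ((pvCand edges target) \ ((seen : PySem.Set Int) ++ [curr]).toFinset).card
              + (2 * pvMaxDeg edges + 3)
              = (2 * pvMaxDeg edges + 3) *
                ((pvCand edges target) \ seen.toFinset).card := by
            rw [← hcard]; ring
          simp only [List.length_append, List.length_reverse, List.length_cons] at *
          omega
        · exact pvStackSub hsub _ (fun x hx => (List.mem_filter.1 hx).1)

lemma pvA_iff (edges : List (List Int)) (target : Int) :
    dfs_find_cycle edges target = true ↔ pvPred edges target := by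
  have hC := pvCand_card_le edges target
  have hcard0 : ((pvCand edges target) \ (PySem.Set.empty : PySem.Set Int).toFinset).card
      ≤ 1 + edges.flatten.length := by
    simpa [PySem.Set.empty] using hC
  have hmul : (2 * pvMaxDeg edges + 3) *
      ((pvCand edges target) \ (PySem.Set.empty : PySem.Set Int).toFinset).card
      ≤ (2 * pvMaxDeg edges + 3) * (1 + edges.flatten.length) :=
    Nat.mul_le_mul_left _ hcard0
  have htot := pvA_total edges target (pvFuelA edges) [target] PySem.Set.empty
    (by unfold pvFuelA; simp only [List.length_cons, List.length_nil]; omega)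
    (by intro x hx
        rcases List.mem_cons.1 hx with hx | hx
        · subst hx; exact Finset.mem_insert_self _ _
        · simp at hx)
  unfold dfs_find_cycle
  cases hres : pvDfsLoop edges target (pvFuelA edges) [target] PySem.Set.empty with
  | none => exact absurd hres htot
  | some b =>
    simp only [Option.getD_some]
    constructor
    · intro hb
      subst hb
      exact pvA_sound edges target _ [target] PySem.Set.empty
        (by intro x hx
            rcases List.mem_cons.1 hx with hx | hx
            · subst hx; exact pvReach.base
            · simp at hx) hres
    · intro hpred
      by_contra hb
      have hb' : b = false := by cases b <;> simp_all
      subst hb'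
      exact (pvA_false edges target _ [target] PySem.Set.empty
        (by intro u hu; simp [PySem.Set.empty] at hu)
        (by intro u hu; simp [PySem.Set.empty] at hu)
        (Or.inr (by simp)) hres) hpred

-- ===== B-side =====

lemma pvB_sound (edges : List (List Int)) (target : Int) :
    ∀ (f : Nat) (reach frontier : PySem.Set Int),
      (∀ x ∈ frontier, pvReach edges target x) →
      pvBfsLoop edges target f reach frontier = some true →
      pvPred edges target := by
  intro f
  induction f with
  | zero => intro reach frontier _ h; simp [pvBfsLoop] at h
  | succ f ih =>
    intro reach frontier hfr h
    simp only [pvBfsLoop] at h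
    by_cases hnil : (frontier : List Int) = []
    · simp [hnil] at h
    · rw [if_neg hnil] at h
      by_cases hany : frontier.any (fun u => decide (target ∈ pvRow edges u)) = true
      · obtain ⟨u, hu, hd⟩ := List.any_eq_true.1 hany
        exact ⟨u, hfr u hu, of_decide_eq_true hd⟩
      · rw [if_neg hany] at h
        refine ih _ _ ?_ h
        intro x hx
        obtain ⟨u, hu, hxu⟩ :=
          List.mem_flatMap.1 (List.mem_filter.1 ((PySem.Set.mem_ofList _ _).1 hx)).1
        exact pvReach.step (hfr u hu) hxu

lemma pvB_false (edges : List (List Int)) (target : Int) :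
    ∀ (f : Nat) (reach frontier : PySem.Set Int),
      target ∈ reach →
      (∀ u ∈ reach, u ∈ frontier ∨
        (target ∉ pvRow edges u ∧ ∀ c ∈ pvRow edges u, c ∈ reach)) →
      (∀ x ∈ frontier, x ∈ reach) →
      pvBfsLoop edges target f reach frontier = some false →
      ¬ pvPred edges target := by
  intro f
  induction f with
  | zero => intro reach frontier _ _ _ h; simp [pvBfsLoop] at h
  | succ f ih =>
    intro reach frontier ht hcl hfr h
    simp only [pvBfsLoop] at h
    by_cases hnil : (frontier : List Int) = []
    · -- the reachable set is saturated and nowhere hits target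
      rintro ⟨c, hc, htc⟩
      have hclosed : ∀ u ∈ reach, target ∉ pvRow edges u ∧ ∀ c ∈ pvRow edges u, c ∈ reach := by
        intro u hu
        rcases hcl u hu with hu' | hu'
        · rw [hnil] at hu'; simp at hu'
        · exact hu'
      have hreach : ∀ x, pvReach edges target x → x ∈ reach := by
        intro x hx
        induction hx with
        | base => exact ht
        | step hu hcu ihx => exact (hclosed _ ihx).2 _ hcu
      exact (hclosed c (hreach c hc)).1 htc
    · rw [if_neg hnil] at h
      by_cases hany : frontier.any (fun u => decide (target ∈ pvRow edges u)) = true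
      · simp [hany] at h
      · rw [if_neg hany] at h
        have hnohit : ∀ u ∈ frontier, target ∉ pvRow edges u := by
          intro u hu hhit
          exact hany (List.any_eq_true.2 ⟨u, hu, decide_eq_true hhit⟩)
        refine ih _ _ ((PySem.Set.mem_update _ _ _).2 (Or.inl ht)) ?_ ?_ h
        · intro u hu
          rcases (PySem.Set.mem_update _ _ _).1 hu with hu | hu
          · rcases hcl u hu with hu' | hu'
            · -- u was in the frontier: no hit, and each child goes to reach or nxt
              refine Or.inr ⟨hnohit u hu', ?_⟩
              intro c hc
              by_cases hcr : c ∈ reach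
              · exact (PySem.Set.mem_update _ _ _).2 (Or.inl hcr)
              · refine (PySem.Set.mem_update _ _ _).2 (Or.inr ?_)
                rw [PySem.Set.mem_ofList]
                refine List.mem_filter.2 ⟨List.mem_flatMap.2 ⟨u, hu', hc⟩, ?_⟩
                simp only [Bool.not_eq_eq_eq_not, Bool.not_true]
                rw [← Bool.not_eq_true, PySem.Set.contains_iff]
                exact hcr
            · exact Or.inr ⟨hu'.1, fun c hc =>
                (PySem.Set.mem_update _ _ _).2 (Or.inl (hu'.2 c hc))⟩
          · exact Or.inl hu
        · intro x hx
          exact (PySem.Set.mem_update _ _ _).2 (Or.inr hx)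

lemma pvB_total (edges : List (List Int)) (target : Int) :
    ∀ (f : Nat) (reach frontier : PySem.Set Int),
      2 * ((pvCand edges target) \ reach.toFinset).card + 2 < f →
      pvBfsLoop edges target f reach frontier ≠ none := by
  intro f
  induction f with
  | zero => intro reach frontier h; omega
  | succ f ih =>
    intro reach frontier hmu
    simp only [pvBfsLoop]
    by_cases hnil : (frontier : List Int) = []
    · simp [hnil]
    · rw [if_neg hnil]
      by_cases hany : frontier.any (fun u => decide (target ∈ pvRow edges u)) = true
      · simp [hany]
      · rw [if_neg hany]
        set nxt : PySem.Set Int := PySem.Set.ofList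
          ((frontier.flatMap (fun u => pvRow edges u)).filter
            (fun c => !(PySem.Set.contains reach c))) with hns
        by_cases hne : (nxt : List Int) = []
        · -- next round sees an empty frontier and stops
          match f, hmu with
          | Nat.succ g, _ =>
            simp only [pvBfsLoop, hne, if_pos]
            simp
        · obtain ⟨p, hp⟩ : ∃ p, p ∈ nxt := List.exists_mem_of_ne_nil nxt hne
          have hpfil := (PySem.Set.mem_ofList _ _).1 hp
          have hpnew : p ∉ reach := pvNotMem_of_filter (List.mem_filter.1 hpfil).2
          have hpcand : p ∈ pvCand edges target := by
            obtain ⟨u, hu, hpu⟩ := List.mem_flatMap.1 (List.mem_filter.1 hpfil).1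
            exact Finset.mem_insert_of_mem (List.mem_toFinset.2 (pvRow_sub_flatten hpu))
          have hss : (pvCand edges target) \ (PySem.Set.update reach nxt).toFinset
              ⊂ (pvCand edges target) \ reach.toFinset := by
            constructor
            · intro x hx
              rw [Finset.mem_sdiff] at hx ⊢
              refine ⟨hx.1, fun hc => hx.2 ?_⟩
              rw [List.mem_toFinset] at hc ⊢
              exact (PySem.Set.mem_update _ _ _).2 (Or.inl hc)
            · intro hsup
              have hpin : p ∈ (pvCand edges target) \ reach.toFinset := by
                rw [Finset.mem_sdiff]; exact ⟨hpcand, by simpa using hpnew⟩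
              have := hsup hpin
              rw [Finset.mem_sdiff, List.mem_toFinset] at this
              exact this.2 ((PySem.Set.mem_update _ _ _).2 (Or.inr hp))
          have := Finset.card_lt_card hss
          exact ih _ _ (by omega)

lemma pvB_iff (edges : List (List Int)) (target : Int) :
    dfs_find_cycle_alt edges target = true ↔ pvPred edges target := by
  have hsub0 : (pvCand edges target) \ (PySem.Set.ofList [target] : List Int).toFinset
      ⊆ edges.flatten.toFinset := by
    intro x hx
    rw [Finset.mem_sdiff] at hx
    rcases Finset.mem_insert.1 hx.1 with hx1 | hx1
    · exact absurd (by rw [List.mem_toFinset, PySem.Set.mem_ofList]; simp [hx1]) hx.2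
    · exact hx1
  have hcard0 : ((pvCand edges target) \ (PySem.Set.ofList [target] : List Int).toFinset).card
      ≤ edges.flatten.length :=
    le_trans (Finset.card_le_card hsub0) edges.flatten.toFinset_card_le
  have htot := pvB_total edges target (2 * edges.flatten.length + 4)
    (PySem.Set.ofList [target]) (PySem.Set.ofList [target]) (by omega)
  unfold dfs_find_cycle_alt
  cases hres : pvBfsLoop edges target (2 * edges.flatten.length + 4)
      (PySem.Set.ofList [target]) (PySem.Set.ofList [target]) with
  | none => exact absurd hres htot
  | some b =>
    simp only [Option.getD_some]
    have hsing : ∀ x ∈ (PySem.Set.ofList [target] : List Int), x = target := by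
      intro x hx
      rw [PySem.Set.mem_ofList] at hx
      simpa using hx
    have htmem : target ∈ (PySem.Set.ofList [target] : List Int) := by
      rw [PySem.Set.mem_ofList]; simp
    constructor
    · intro hb
      subst hb
      exact pvB_sound edges target _ _ _
        (fun x hx => (hsing x hx) ▸ pvReach.base) hres
    · intro hpred
      by_contra hb
      have hb' : b = false := by cases b <;> simp_all
      subst hb'
      exact (pvB_false edges target _ _ _ htmem
        (fun u hu => Or.inl ((hsing u hu) ▸ htmem))
        (fun x hx => hx) hres) hpred

-- ===== VERDICT (by name: the statement is the Claim_ definition above) =====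
theorem dfs_find_cycle_spec : Claim_equal_dfs_find_cycle := by
  intro edges target _ _
  unfold Spec_dfs_find_cycle
  have hA := pvA_iff edges target
  have hB := pvB_iff edges target
  cases hx : dfs_find_cycle edges target <;> cases hy : dfs_find_cycle_alt edges target <;>
    simp_all
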